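-- pv_equiv track=rewrite | github.com/JunSeokCheon/problem-solving-with-study | programmers(2022-02-14~)/LEVEL 1/비밀 지도.py | solution
-- ===== SOURCE A (Python) =====
-- def solution(n, arr1, arr2):
--     answer = []
--     arr1_list = []
--     arr2_list = []
--
--     for num1, num2 in zip(arr1, arr2):
--         result = num1|num2
--
--         ssap = ''
--         while result != 0:
--             ssap += str(result%2)
--             result //= 2
--         while len(ssap) != n:
--             ssap += str(0)
--         ssap = ssap[::-1]
--         ssap = ssap.replace("1", "#")
--         ssap = ssap.replace("0", " ")
--         answer.append(ssap)
--
--     return answer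
-- ===== SOURCE B (Python) =====
-- def solution(n, arr1, arr2):
--     return [''.join('#' if (a | b) >> (n - 1 - i) & 1 else ' ' for i in range(n))
--             for a, b in zip(arr1, arr2)]
-- ===== Notes on version B (the rewrite author's own statement) =====
-- stated objective: idiomatic
-- what changed: Each row is built in one pass over bit positions MSB-to-LSB with shift-and-mask, replacing A's LSB-first digit extraction loop, padding loop, string reversal and two replace passes.
import Mathlib
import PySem

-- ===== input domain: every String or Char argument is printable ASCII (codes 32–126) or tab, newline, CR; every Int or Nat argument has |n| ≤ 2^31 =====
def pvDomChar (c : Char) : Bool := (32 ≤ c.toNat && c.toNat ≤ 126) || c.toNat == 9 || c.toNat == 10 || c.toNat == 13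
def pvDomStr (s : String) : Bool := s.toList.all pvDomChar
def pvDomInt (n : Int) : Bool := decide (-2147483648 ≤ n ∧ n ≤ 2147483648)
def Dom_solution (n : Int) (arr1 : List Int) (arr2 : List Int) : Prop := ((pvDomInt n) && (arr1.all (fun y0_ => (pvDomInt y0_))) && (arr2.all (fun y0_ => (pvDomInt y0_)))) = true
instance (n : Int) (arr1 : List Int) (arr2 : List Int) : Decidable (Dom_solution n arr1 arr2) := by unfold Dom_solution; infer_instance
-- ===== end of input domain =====

-- B builds each row in one MSB-to-LSB pass with shift-and-mask, replacing A's LSB-first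
-- digit loop + padding loop + reversal + two replaces (objective: idiomatic; same cost).

-- ===== PORT A =====
-- while result != 0: ssap += str(result%2); result //= 2
-- (guard written as r ≤ 0 only to make the function total: Python diverges for r < 0,
--  and such inputs are excluded by Pre_solution)
def pvDigits (r : Int) : List Char :=
  if h : r ≤ 0 then []
  else (PySem.Int.toStr (PySem.Int.mod r 2)).toList ++ pvDigits (PySem.Int.floordiv r 2)
termination_by r.toNat
decreasing_by
  rw [PySem.Int.floordiv_eq_ediv_of_pos (by decide)]
  omega

-- one row of A: the two replaces act character-wise, ported as maps over the char list
def pvRowA (n : Int) (r : Int) : String :=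
  let ssap := pvDigits r
  -- while len(ssap) != n: ssap += str(0)   (diverges in Python if len > n or n < 0; Pre_ excludes)
  let ssap := ssap ++ List.replicate (n.toNat - ssap.length) '0'
  let ssap := ssap.reverse
  let ssap := ssap.map (fun c => if c = '1' then '#' else c)
  let ssap := ssap.map (fun c => if c = '0' then ' ' else c)
  String.mk ssap

def solution (n : Int) (arr1 : List Int) (arr2 : List Int) : List String :=
  (arr1.zip arr2).foldl (fun answer p => answer ++ [pvRowA n (PySem.Int.bor p.1 p.2)]) []

-- ===== PORT B =====
-- ''.join('#' if (a|b) >> (n-1-i) & 1 else ' ' for i in range(n)); the shift amount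
-- n-1-i is always ≥ 0 inside range(n), so it is the Nat n.toNat - 1 - i
def solution_alt (n : Int) (arr1 : List Int) (arr2 : List Int) : List String :=
  (arr1.zip arr2).map (fun p =>
    String.mk ((List.range n.toNat).map (fun i =>
      if PySem.Int.band ((PySem.Int.bor p.1 p.2) >>> (n.toNat - 1 - i)) 1 ≠ 0 then '#' else ' ')))

-- ===== PRECONDITION & SPEC =====
-- Pre_ excludes exactly the inputs where A never returns: some row's OR is negative
-- (the digit loop diverges) or does not fit in n bits (the padding loop diverges).
def Pre_solution (n : Int) (arr1 : List Int) (arr2 : List Int) : Prop :=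
  ∀ p ∈ arr1.zip arr2,
    0 ≤ n ∧ 0 ≤ PySem.Int.bor p.1 p.2 ∧ PySem.Int.bor p.1 p.2 < 2 ^ n.toNat
instance (n : Int) (arr1 : List Int) (arr2 : List Int) : Decidable (Pre_solution n arr1 arr2) := by
  unfold Pre_solution; infer_instance

def pvWitness_solution : Int × List Int × List Int := (2, [1], [2])

def Spec_solution (n : Int) (arr1 : List Int) (arr2 : List Int) (out : List String) : Prop := out = solution_alt n arr1 arr2
instance (n : Int) (arr1 : List Int) (arr2 : List Int) (out : List String) : Decidable (Spec_solution n arr1 arr2 out) := by unfold Spec_solution; infer_instance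

-- ===== CLAIM (what is proved, stated in full; the proofs are below) =====
def Claim_equal_solution : Prop := ∀ (n : Int) (arr1 : List Int) (arr2 : List Int), Dom_solution n arr1 arr2 → Pre_solution n arr1 arr2 → Spec_solution n arr1 arr2 (solution n arr1 arr2)

-- ===== LEMMAS AND PROOFS =====

theorem pvFoldl_append {α β : Type} (f : α → β) (l : List α) (acc : List β) :
    l.foldl (fun a p => a ++ [f p]) acc = acc ++ l.map f := by
  induction l generalizing acc with
  | nil => simp
  | cons x xs ih => simp [List.foldl_cons, ih]

-- A's digit string, padded to m, is the LSB-first list of the m low bits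
theorem pvPadded (m : Nat) (r : Int) (h0 : 0 ≤ r) (hlt : r < 2 ^ m) :
    pvDigits r ++ List.replicate (m - (pvDigits r).length) '0' =
      (List.range m).map (fun k => if r / 2 ^ k % 2 = 1 then '1' else '0') := by
  induction m generalizing r with
  | zero =>
    have : r = 0 := by omega
    subst this
    simp [pvDigits]
  | succ m ih =>
    by_cases hz : r ≤ 0
    · have hr : r = 0 := le_antisymm hz h0
      subst hr
      rw [pvDigits]
      simp only [le_refl, dite_true, List.nil_append, List.length_nil, Nat.sub_zero]
      symm
      rw [List.eq_replicate_iff]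
      refine ⟨by simp, ?_⟩
      intro c hc
      simp only [List.mem_map, List.mem_range] at hc
      obtain ⟨k, _, hk⟩ := hc
      simpa using hk.symm
    · replace hz := lt_of_not_ge hz
      rw [pvDigits]
      simp only [not_le.mpr hz, dite_false]
      have hmod : PySem.Int.mod r 2 = r % 2 := PySem.Int.mod_eq_emod_of_pos (by decide)
      have hdiv : PySem.Int.floordiv r 2 = r / 2 := PySem.Int.floordiv_eq_ediv_of_pos (by decide)
      have hchar : (PySem.Int.toStr (PySem.Int.mod r 2)).toList =
          [if r / 2 ^ 0 % 2 = 1 then '1' else '0'] := by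
        rw [hmod]
        have h2 : r % 2 = 0 ∨ r % 2 = 1 := by omega
        rcases h2 with h2 | h2 <;> rw [h2] <;> simp [h2] <;> decide
      rw [hchar, hdiv]
      have hd0 : 0 ≤ r / 2 := Int.ediv_nonneg h0 (by decide)
      have hdlt : r / 2 < 2 ^ m := by
        have : r < 2 ^ m * 2 := by rw [← pow_succ]; exact hlt
        omega
      have ihx := ih (r / 2) hd0 hdlt
      simp only [List.singleton_append, List.cons_append, List.nil_append, List.length_cons]
      have hlen : m + 1 - ((pvDigits (r / 2)).length + 1) = m - (pvDigits (r / 2)).length := by omega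
      rw [hlen]
      rw [List.range_succ_eq_map]
      simp only [List.map_cons, List.map_map]
      refine congrArg (List.cons _) ?_
      rw [ihx]
      apply List.map_congr_left
      intro k _
      have : r / 2 ^ (k + 1) = r / 2 / 2 ^ k := by
        rw [pow_succ', ← Int.ediv_ediv_of_nonneg (show (0:Int) ≤ 2 by decide)]
      simp [Function.comp, this]

theorem pvRevRange {α : Type} (m : Nat) (f : Nat → α) :
    ((List.range m).map f).reverse = (List.range m).map (fun i => f (m - 1 - i)) := by
  apply List.ext_getElem
  · simp
  · intro i h1 h2
    simp only [List.length_reverse, List.length_map, List.length_range] at h1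
    rw [List.getElem_reverse]
    simp only [List.getElem_map, List.getElem_range, List.length_map, List.length_range]

-- per-row equality
theorem pvRow (n : Int) (r : Int) (hn : 0 ≤ n) (h0 : 0 ≤ r) (hlt : r < 2 ^ n.toNat) :
    pvRowA n r = String.mk ((List.range n.toNat).map (fun i =>
      if PySem.Int.band (r >>> (n.toNat - 1 - i)) 1 ≠ 0 then '#' else ' ')) := by
  unfold pvRowA
  simp only []
  rw [pvPadded n.toNat r h0 hlt]
  rw [pvRevRange]
  simp only [List.map_map]
  congr 1
  apply List.map_congr_left
  intro i hi
  simp only [List.mem_range] at hi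
  have hband : PySem.Int.band (r >>> (n.toNat - 1 - i)) 1 = r >>> (n.toNat - 1 - i) % 2 := by
    rw [PySem.Int.band_one]
    exact PySem.Int.mod_eq_emod_of_pos (by decide)
  have hshift : r >>> (n.toNat - 1 - i) = r / 2 ^ (n.toNat - 1 - i) := by
    rw [Int.shiftRight_eq_div_pow]; norm_cast
  have hq0 : 0 ≤ r / 2 ^ (n.toNat - 1 - i) := Int.ediv_nonneg h0 (le_of_lt (pow_pos (by decide) _))
  have hm : r / 2 ^ (n.toNat - 1 - i) % 2 = 0 ∨ r / 2 ^ (n.toNat - 1 - i) % 2 = 1 := by omega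
  rw [hshift] at hband
  simp only [Function.comp]
  rcases hm with hm | hm <;> rw [hshift, hband, hm] <;> simp

-- ===== VERDICT (by name: the statement is the Claim_ definition above) =====
theorem solution_spec : Claim_equal_solution := by
  intro n arr1 arr2 _ hpre
  unfold Spec_solution solution solution_alt
  rw [pvFoldl_append]
  simp only [List.nil_append]
  apply List.map_congr_left
  intro p hp
  obtain ⟨hn, h0, hlt⟩ := hpre p hp
  exact pvRow n (PySem.Int.bor p.1 p.2) hn h0 hlt
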